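-- pv_equiv track=rewrite | github.com/Brblal/TdA25BakingBread | website/routes.py | compute_game_state
-- ===== SOURCE A (Python) =====
-- def compute_game_state(board):
--     """Analyze the board and determine the game state."""
--
--     # Flatten the board and count 'X' and 'O' symbols
--     flattened_board = [cell for row in board for cell in row]
--     x_count = flattened_board.count('X')
--     o_count = flattened_board.count('O')
--
--     # Determine state based on move count (Opening or Midgame)
--     total_moves = x_count + o_count
--     if total_moves < 6:
--         return "opening"
--
--     # Check for Endgame conditions (4 consecutive X's or O's)
--     def check_line(line):
--         count = 1
--         for i in range(1, len(line)):
--             if line[i] == line[i - 1] and line[i] in ['X', 'O']: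
--                 count += 1
--                 if count >= 4:
--                     return True
--             else:
--                 count = 1
--         return False
--
--     # Check rows for a winning condition
--     for row in board:
--         if check_line(row):
--             return "endgame"
--
--     # Check columns for a winning condition
--     for col in range(len(board[0])):
--         column = [board[row][col] for row in range(len(board))]
--         if check_line(column):
--             return "endgame"
--
--     # Check diagonals for a winning condition
--     for d in range(-len(board) + 1, len(board[0])):
--         diagonal1 = [board[i][i + d] for i in range(max(0, -d), min(len(board), len(board[0]) - d))]
--         diagonal2 = [board[i][len(board[0]) - 1 - i - d] for i in range(max(0, -d), min(len(board), len(board[0]) - d))]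
--         if check_line(diagonal1) or check_line(diagonal2):
--             return "endgame"
--
--     # If the game is still possible, it's Midgame (there are still empty cells)
--     if "" in flattened_board:
--         return "midgame"
--
--     # If no empty cells and no winner, it's a draw
--     return "draw"
-- ===== SOURCE B (Python) =====
-- def compute_game_state(board):
--     """Analyze the board and determine the game state."""
--     flat = [cell for row in board for cell in row]
--     total_moves = sum(1 for cell in flat if cell in ('X', 'O'))
--     if total_moves < 6:
--         return "opening"
--
--     m = len(board)
--     n = len(board[0])
--     # Single directional scan: from each occupied cell look right, down,
--     # down-right and down-left for three further equal cells.
--     for r in range(m):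
--         for c in range(n):
--             v = board[r][c]
--             if v in ('X', 'O'):
--                 for dr, dc in ((0, 1), (1, 0), (1, 1), (1, -1)):
--                     if 0 <= r + 3 * dr < m and 0 <= c + 3 * dc < n and \
--                        all(board[r + k * dr][c + k * dc] == v for k in (1, 2, 3)):
--                         return "endgame"
--
--     return "midgame" if "" in flat else "draw"
-- ===== Notes on version B (the rewrite author's own statement) =====
-- stated objective: alternative
-- what changed: The three separate line-extraction passes (rows, columns, both diagonals of every offset) each rescanned by a run-length counter are replaced by a single scan over the cells that, from each occupied cell, checks the four directions right/down/down-right/down-left for three further equal in-bounds cells; the opening gate and midgame/draw logic are unchanged.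
-- outside the precondition, e.g. on compute_game_state([['X', 'X', 'X', 'X', 'X', 'X'], ['X']]): A returns 'endgame', B returns 'endgame'; on compute_game_state([[], ['X', 'y', 'X', 'X', 'X', 'X', 'X']]): A returns 'endgame', B returns 'draw'
import Mathlib
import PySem

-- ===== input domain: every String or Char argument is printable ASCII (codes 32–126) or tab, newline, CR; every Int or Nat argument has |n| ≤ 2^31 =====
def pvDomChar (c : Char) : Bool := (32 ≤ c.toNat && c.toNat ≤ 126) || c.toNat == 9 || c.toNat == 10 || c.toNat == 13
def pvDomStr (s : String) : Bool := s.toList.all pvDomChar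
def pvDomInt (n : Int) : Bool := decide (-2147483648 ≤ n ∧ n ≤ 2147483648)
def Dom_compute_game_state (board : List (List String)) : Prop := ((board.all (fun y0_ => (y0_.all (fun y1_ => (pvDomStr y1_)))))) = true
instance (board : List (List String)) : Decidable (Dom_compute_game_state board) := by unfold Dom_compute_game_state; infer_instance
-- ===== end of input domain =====

-- B replaces A's per-line extraction-and-rescan endgame check by a single
-- directional scan over the cells (same cost class, no intermediate lists);
-- opening/midgame/draw logic is unchanged.


-- ===== PORT A =====
-- board[i][j]; both programs only read nonnegative in-range indices inside Pre_,
-- where pyGetD's default is never used (out-of-range reads are a Python IndexError,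
-- excluded by Pre_).
def pvCell (board : List (List String)) (i j : Int) : String :=
  PySem.List.pyGetD (PySem.List.pyGetD board i []) j ""

-- the loop of A's check_line: prev = line[i-1], count = current run length
def pvCheckLineLoop : String → Int → List String → Bool
  | _, _, [] => false
  | prev, count, x :: rest =>
      if x == prev && (x == "X" || x == "O") then
        (if count + 1 ≥ 4 then true else pvCheckLineLoop x (count + 1) rest)
      else pvCheckLineLoop x 1 rest

def pvCheckLine (line : List String) : Bool :=
  match line with
  | [] => false
  | h :: t => pvCheckLineLoop h 1 t

def compute_game_state (board : List (List String)) : String :=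
  let flattened := board.flatMap (fun row => row)
  let x_count := flattened.count "X"
  let o_count := flattened.count "O"
  let total_moves := x_count + o_count
  if total_moves < 6 then "opening"
  else if board.any (fun row => pvCheckLine row) then "endgame"
  else
    let mI : Int := (board.length : Int)
    let nI : Int := ((board.headD []).length : Int)
    if (PySem.List.pyRange 0 nI 1).any (fun col =>
         pvCheckLine ((PySem.List.pyRange 0 mI 1).map (fun row => pvCell board row col)))
    then "endgame"
    else if (PySem.List.pyRange (-mI + 1) nI 1).any (fun d =>
         pvCheckLine ((PySem.List.pyRange (max 0 (-d)) (min mI (nI - d)) 1).map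
            (fun i => pvCell board i (i + d)))
         || pvCheckLine ((PySem.List.pyRange (max 0 (-d)) (min mI (nI - d)) 1).map
            (fun i => pvCell board i (nI - 1 - i - d))))
    then "endgame"
    else if flattened.contains "" then "midgame" else "draw"

-- ===== PORT B =====
def pvDirs : List (Int × Int) := [(0, 1), (1, 0), (1, 1), (1, -1)]

def compute_game_state_alt (board : List (List String)) : String :=
  let flat := board.flatMap (fun row => row)
  let total_moves := (flat.filter (fun cell => cell == "X" || cell == "O")).length
  if total_moves < 6 then "opening"
  else
    let m := board.length
    let n := (board.headD []).length
    if (List.range m).any (fun r => (List.range n).any (fun c =>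
        let v := pvCell board r c
        (v == "X" || v == "O") &&
        pvDirs.any (fun dir =>
          decide (0 ≤ (r : Int) + 3 * dir.1) && decide ((r : Int) + 3 * dir.1 < (m : Int)) &&
          decide (0 ≤ (c : Int) + 3 * dir.2) && decide ((c : Int) + 3 * dir.2 < (n : Int)) &&
          ([(1 : Int), 2, 3]).all (fun k =>
            pvCell board ((r : Int) + k * dir.1) ((c : Int) + k * dir.2) == v))))
    then "endgame"
    else if flat.contains "" then "midgame" else "draw"

-- ===== PRECONDITION & SPEC =====
-- Pre_ excludes ragged boards (rows of differing length) once at least six cells are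
-- occupied: there Python A either raises IndexError while extracting columns/diagonals
-- or (when an early full-row win masks the raggedness) returns a value read from cells
-- outside the rectangle B scans; see claim.json "cites".
def Pre_compute_game_state (board : List (List String)) : Prop :=
  (∀ row ∈ board, row.length = (board.headD []).length) ∨
  ((board.flatMap (fun row => row)).countP (fun cell => cell == "X" || cell == "O") < 6)

instance (board : List (List String)) : Decidable (Pre_compute_game_state board) := by
  unfold Pre_compute_game_state; infer_instance

def pvWitness_compute_game_state : List (List String) :=
  [["X", "X", "X"], ["O", "O", "O"]]

def Spec_compute_game_state (board : List (List String)) (out : String) : Prop := out = compute_game_state_alt board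
instance (board : List (List String)) (out : String) : Decidable (Spec_compute_game_state board out) := by unfold Spec_compute_game_state; infer_instance

-- ===== CLAIM (what is proved, stated in full; the proofs are below) =====
def Claim_equal_compute_game_state : Prop := ∀ (board : List (List String)), Dom_compute_game_state board → Pre_compute_game_state board → Spec_compute_game_state board (compute_game_state board)

-- ===== LEMMAS AND PROOFS =====

def pvXO (s : String) : Bool := s == "X" || s == "O"

def pvRunAt (l : List String) (j : Nat) : Prop :=
  j + 3 < l.length ∧ pvXO (l.getD j "") = true ∧
  l.getD (j+1) "" = l.getD j "" ∧ l.getD (j+2) "" = l.getD j "" ∧ l.getD (j+3) "" = l.getD j ""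

theorem pv_runAt_cons_succ (x : String) (t : List String) (j : Nat) :
    pvRunAt (x :: t) (j+1) ↔ pvRunAt t j := by
  simp only [pvRunAt, List.getD_cons_succ, List.length_cons]
  constructor <;> rintro ⟨hl, rest⟩ <;> exact ⟨by omega, rest⟩

theorem pv_runAt_cons_zero (x : String) (t : List String) :
    pvRunAt (x :: t) 0 ↔
      (pvXO x = true ∧ 3 ≤ t.length ∧ t.getD 0 "" = x ∧ t.getD 1 "" = x ∧ t.getD 2 "" = x) := by
  simp only [pvRunAt, List.getD_cons_succ, List.getD_cons_zero, List.length_cons]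
  constructor
  · rintro ⟨hl, hxo, h0, h1, h2⟩; exact ⟨hxo, by omega, h0, h1, h2⟩
  · rintro ⟨hxo, hl, h0, h1, h2⟩; exact ⟨by omega, hxo, h0, h1, h2⟩

theorem pv_loop_iff (t : List String) : ∀ (p : String) (c : Int), 1 ≤ c → c ≤ 3 →
    (pvCheckLineLoop p c t = true ↔
      ((pvXO p = true ∧ (4 - c).toNat ≤ t.length ∧ ∀ i < (4 - c).toNat, t.getD i "" = p)
        ∨ ∃ j, pvRunAt t j)) := by
  induction t with
  | nil =>
    intro p c h1 h3
    simp only [pvCheckLineLoop, pvRunAt, List.length_nil]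
    constructor
    · intro h; exact absurd h (by simp)
    · rintro (⟨_, hlen, _⟩ | ⟨j, hj, _⟩)
      · omega
      · omega
  | cons x t ih =>
    intro p c h1 h3
    have hshift := pv_runAt_cons_succ x t
    have hrun0 := pv_runAt_cons_zero x t
    by_cases hx : (x == p && (x == "X" || x == "O")) = true
    · have hxp : x = p := by
        have := (Bool.and_eq_true _ _).mp hx
        exact eq_of_beq this.1
      have hXO : pvXO x = true := by
        have := (Bool.and_eq_true _ _).mp hx
        simpa [pvXO] using this.2
      by_cases hc : c = 3
      · subst hc
        have hL : pvCheckLineLoop p 3 (x :: t) = true := by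
          simp [pvCheckLineLoop, hx]
        rw [hL]
        simp only [true_iff]
        left
        refine ⟨hxp ▸ hXO, by simp, ?_⟩
        intro i hi
        have : i = 0 := by omega
        subst this
        simpa using hxp
      · have hL : pvCheckLineLoop p c (x :: t) = pvCheckLineLoop x (c + 1) t := by
          simp only [pvCheckLineLoop, hx, if_true]
          rw [if_neg (by omega)]
        rw [hL, ih x (c+1) (by omega) (by omega)]
        subst hxp
        constructor
        · rintro (⟨hxo, hlen, hall⟩ | ⟨j, hr⟩)
          · left
            refine ⟨hxo, by simp; omega, ?_⟩
            intro i hi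
            match i with
            | 0 => simp
            | Nat.succ i =>
              simp only [List.getD_cons_succ]
              exact hall i (by omega)
          · exact Or.inr ⟨j+1, (hshift j).mpr hr⟩
        · rintro (⟨hxo, hlen, hall⟩ | ⟨j, hr⟩)
          · left
            refine ⟨hxo, by simp at hlen ⊢; omega, ?_⟩
            intro i hi
            have := hall (i+1) (by omega)
            simpa using this
          · match j with
            | 0 =>
              rcases hrun0.mp hr with ⟨hxo, hlen, h0, h1', h2⟩
              left
              refine ⟨hxo, by omega, ?_⟩
              intro i hi
              have : i = 0 ∨ i = 1 := by omega
              rcases this with rfl | rfl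
              · exact h0
              · exact h1'
            | Nat.succ j => exact Or.inr ⟨j, (hshift j).mp hr⟩
    · have hL : pvCheckLineLoop p c (x :: t) = pvCheckLineLoop x 1 t := by
        simp only [pvCheckLineLoop, hx]
        simp at hx
        rw [if_neg (by simp [hx])] -- keep
      rw [hL, ih x 1 (by omega) (by omega)]
      have hfirst : ¬ (pvXO p = true ∧ (4 - c).toNat ≤ (x :: t).length ∧
          ∀ i < (4 - c).toNat, (x :: t).getD i "" = p) := by
        rintro ⟨hxo, hlen, hall⟩
        have h0 : (x :: t).getD 0 "" = p := hall 0 (by omega)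
        simp at h0
        subst h0
        simp [pvXO] at hxo hx
        rcases hxo with h | h <;> simp [h] at hx
      constructor
      · rintro (⟨hxo, hlen, hall⟩ | ⟨j, hr⟩)
        · refine Or.inr ⟨0, hrun0.mpr ⟨hxo, by omega, ?_, ?_, ?_⟩⟩
          · exact hall 0 (by omega)
          · exact hall 1 (by omega)
          · exact hall 2 (by omega)
        · exact Or.inr ⟨j+1, (hshift j).mpr hr⟩
      · rintro (hb | ⟨j, hr⟩)
        · exact absurd hb hfirst
        · match j with
          | 0 =>
            rcases hrun0.mp hr with ⟨hxo, hlen, h0, h1', h2⟩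
            left
            refine ⟨hxo, by omega, ?_⟩
            intro i hi
            have : i = 0 ∨ i = 1 ∨ i = 2 := by omega
            rcases this with rfl | rfl | rfl
            · exact h0
            · exact h1'
            · exact h2
          | Nat.succ j => exact Or.inr ⟨j, (hshift j).mp hr⟩

theorem pvCheckLine_iff (l : List String) :
    pvCheckLine l = true ↔ ∃ j, pvRunAt l j := by
  match l with
  | [] =>
    simp [pvCheckLine, pvRunAt]
  | h :: t =>
    rw [pvCheckLine, pv_loop_iff t h 1 (by omega) (by omega)]
    have hshift := pv_runAt_cons_succ h t
    have hrun0 := pv_runAt_cons_zero h t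
    constructor
    · rintro (⟨hxo, hlen, hall⟩ | ⟨j, hr⟩)
      · refine ⟨0, hrun0.mpr ⟨hxo, by omega, hall 0 (by omega), hall 1 (by omega), hall 2 (by omega)⟩⟩
      · exact ⟨j+1, (hshift j).mpr hr⟩
    · rintro ⟨j, hr⟩
      match j with
      | 0 =>
        rcases hrun0.mp hr with ⟨hxo, hlen, h0, h1', h2⟩
        left
        refine ⟨hxo, by omega, ?_⟩
        intro i hi
        have : i = 0 ∨ i = 1 ∨ i = 2 := by omega
        rcases this with rfl | rfl | rfl
        · exact h0
        · exact h1'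
        · exact h2
      | Nat.succ j => exact Or.inr ⟨j, (hshift j).mp hr⟩

def pvCellN (b : List (List String)) (i j : Nat) : String := (b.getD i []).getD j ""

theorem pvCell_toNat (b : List (List String)) {i j : Int} (hi : 0 ≤ i) (hj : 0 ≤ j) :
    pvCell b i j = pvCellN b i.toNat j.toNat := by
  unfold pvCell pvCellN
  rw [← Int.toNat_of_nonneg hi, ← Int.toNat_of_nonneg hj,
    PySem.List.pyGetD_natCast, PySem.List.pyGetD_natCast]
  simp [max_eq_left hi, max_eq_left hj]

theorem pv_line_length (f : Int → String) (a e : Int) :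
    ((PySem.List.pyRange a e 1).map f).length = (e - a).toNat := by
  simp [PySem.List.length_pyRange_one]

theorem pv_line_getD (f : Int → String) (a e : Int) (k : Nat) (hk : k < (e - a).toNat) :
    ((PySem.List.pyRange a e 1).map f).getD k "" = f (a + k) := by
  rw [PySem.List.pyRange_one, List.map_map]
  rw [List.getD_eq_getElem?_getD, List.getElem?_map, List.getElem?_range hk]
  simp


theorem pvCellN_congr (b : List (List String)) {i j i' j' : Nat} (hi : i = i') (hj : j = j') :
    pvCellN b i j = pvCellN b i' j' := by rw [hi, hj]

def pvWinR (b : List (List String)) (m n : Nat) : Prop :=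
  ∃ r c, r < m ∧ c + 3 < n ∧ pvXO (pvCellN b r c) = true ∧
    pvCellN b r (c+1) = pvCellN b r c ∧ pvCellN b r (c+2) = pvCellN b r c ∧
    pvCellN b r (c+3) = pvCellN b r c

def pvWinC (b : List (List String)) (m n : Nat) : Prop :=
  ∃ r c, r + 3 < m ∧ c < n ∧ pvXO (pvCellN b r c) = true ∧
    pvCellN b (r+1) c = pvCellN b r c ∧ pvCellN b (r+2) c = pvCellN b r c ∧
    pvCellN b (r+3) c = pvCellN b r c

def pvWinD1 (b : List (List String)) (m n : Nat) : Prop :=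
  ∃ r c, r + 3 < m ∧ c + 3 < n ∧ pvXO (pvCellN b r c) = true ∧
    pvCellN b (r+1) (c+1) = pvCellN b r c ∧ pvCellN b (r+2) (c+2) = pvCellN b r c ∧
    pvCellN b (r+3) (c+3) = pvCellN b r c

def pvWinD2 (b : List (List String)) (m n : Nat) : Prop :=
  ∃ r c, r + 3 < m ∧ 3 ≤ c ∧ c < n ∧ pvXO (pvCellN b r c) = true ∧
    pvCellN b (r+1) (c-1) = pvCellN b r c ∧ pvCellN b (r+2) (c-2) = pvCellN b r c ∧
    pvCellN b (r+3) (c-3) = pvCellN b r c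

-- rows
theorem pv_rows_iff (b : List (List String)) (n : Nat)
    (hrect : ∀ row ∈ b, row.length = n) :
    (b.any (fun row => pvCheckLine row) = true) ↔ pvWinR b b.length n := by
  rw [List.any_eq_true]
  constructor
  · rintro ⟨row, hmem, hcl⟩
    obtain ⟨i, hi, hieq⟩ := List.mem_iff_getElem.mp hmem
    rcases (pvCheckLine_iff _).mp hcl with ⟨j, hr⟩
    have hrow : row = b.getD i [] := by rw [List.getD_eq_getElem b [] hi, hieq]
    rw [hrow] at hr
    obtain ⟨hlen, hxo, h1, h2, h3⟩ := hr
    have hn : (b.getD i []).length = n := by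
      rw [← hrow]; exact hrect _ hmem
    exact ⟨i, j, hi, by omega, hxo, h1, h2, h3⟩
  · rintro ⟨r, c, hr, hc, hxo, h1, h2, h3⟩
    refine ⟨b.getD r [], ?_, ?_⟩
    · rw [List.getD_eq_getElem b [] hr]; exact List.getElem_mem hr
    · rw [pvCheckLine_iff]
      refine ⟨c, ?_, hxo, h1, h2, h3⟩
      have hn : (b.getD r []).length = n := by
        refine hrect _ ?_
        rw [List.getD_eq_getElem b [] hr]; exact List.getElem_mem hr
      omega

-- columns
theorem pv_cols_iff (b : List (List String)) (n : Nat) :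
    ((PySem.List.pyRange 0 (n : Int) 1).any (fun col =>
       pvCheckLine ((PySem.List.pyRange 0 (b.length : Int) 1).map
         (fun row => pvCell b row col))) = true) ↔ pvWinC b b.length n := by
  have hget : ∀ (c : Nat) (i : Nat), i < b.length →
      ((PySem.List.pyRange 0 (b.length : Int) 1).map (fun row => pvCell b row (c : Int))).getD i ""
        = pvCellN b i c := by
    intro c i hi
    rw [pv_line_getD _ _ _ _ (by omega)]
    show pvCell b (0 + (i : Int)) (c : Int) = pvCellN b i c
    rw [pvCell_toNat b (by omega) (by omega)]
    exact pvCellN_congr b (by omega) (by omega)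
  rw [List.any_eq_true]
  constructor
  · rintro ⟨col, hmem, hcl⟩
    rw [PySem.List.mem_pyRange_one] at hmem
    have hcol : col = ((col.toNat : Nat) : Int) := by omega
    rw [hcol] at hcl
    rcases (pvCheckLine_iff _).mp hcl with ⟨j, hlen, hxo, h1, h2, h3⟩
    rw [pv_line_length] at hlen
    rw [hget _ j (by omega)] at hxo h1 h2 h3
    rw [hget _ (j+1) (by omega)] at h1
    rw [hget _ (j+2) (by omega)] at h2
    rw [hget _ (j+3) (by omega)] at h3
    exact ⟨j, col.toNat, by omega, by omega, hxo, h1, h2, h3⟩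
  · rintro ⟨r, c, hrm, hcn, hxo, h1, h2, h3⟩
    refine ⟨(c : Int), by rw [PySem.List.mem_pyRange_one]; omega, ?_⟩
    rw [pvCheckLine_iff]
    refine ⟨r, ?_, ?_, ?_, ?_, ?_⟩
    · rw [pv_line_length]; omega
    · rw [hget _ r (by omega)]; exact hxo
    · rw [hget _ (r+1) (by omega), hget _ r (by omega)]; exact h1
    · rw [hget _ (r+2) (by omega), hget _ r (by omega)]; exact h2
    · rw [hget _ (r+3) (by omega), hget _ r (by omega)]; exact h3

-- diagonals
theorem pv_diags_iff (b : List (List String)) (n : Nat) :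
    ((PySem.List.pyRange (-(b.length : Int) + 1) (n : Int) 1).any (fun d =>
       pvCheckLine ((PySem.List.pyRange (max 0 (-d)) (min (b.length : Int) ((n : Int) - d)) 1).map
          (fun i => pvCell b i (i + d)))
       || pvCheckLine ((PySem.List.pyRange (max 0 (-d)) (min (b.length : Int) ((n : Int) - d)) 1).map
          (fun i => pvCell b i ((n : Int) - 1 - i - d)))) = true)
    ↔ (pvWinD1 b b.length n ∨ pvWinD2 b b.length n) := by
  have hget1 : ∀ (d : Int) (k : Nat), k < (min (b.length : Int) ((n : Int) - d) - max 0 (-d)).toNat →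
      ((PySem.List.pyRange (max 0 (-d)) (min (b.length : Int) ((n : Int) - d)) 1).map
        (fun i => pvCell b i (i + d))).getD k ""
      = pvCellN b (max 0 (-d) + k).toNat (max 0 (-d) + k + d).toNat := by
    intro d k hk
    rw [pv_line_getD _ _ _ _ hk]
    show pvCell b (max 0 (-d) + (k : Int)) (max 0 (-d) + (k : Int) + d) = _
    have had : -d ≤ max 0 (-d) := le_max_right _ _
    have ha0 : (0:Int) ≤ max 0 (-d) := le_max_left _ _
    rw [pvCell_toNat b (by omega) (by omega)]
  have hget2 : ∀ (d : Int) (k : Nat), k < (min (b.length : Int) ((n : Int) - d) - max 0 (-d)).toNat →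
      ((PySem.List.pyRange (max 0 (-d)) (min (b.length : Int) ((n : Int) - d)) 1).map
        (fun i => pvCell b i ((n : Int) - 1 - i - d))).getD k ""
      = pvCellN b (max 0 (-d) + k).toNat ((n : Int) - 1 - (max 0 (-d) + k) - d).toNat := by
    intro d k hk
    rw [pv_line_getD _ _ _ _ hk]
    show pvCell b (max 0 (-d) + (k : Int)) ((n : Int) - 1 - (max 0 (-d) + (k : Int)) - d) = _
    have had : -d ≤ max 0 (-d) := le_max_right _ _
    have ha0 : (0:Int) ≤ max 0 (-d) := le_max_left _ _
    have hkm : max 0 (-d) + (k : Int) < min (b.length : Int) ((n : Int) - d) := by omega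
    have := min_le_right (b.length : Int) ((n : Int) - d)
    rw [pvCell_toNat b (by omega) (by omega)]
  rw [List.any_eq_true]
  constructor
  · rintro ⟨d, hmem, hor⟩
    rw [PySem.List.mem_pyRange_one] at hmem
    have had : -d ≤ max 0 (-d) := le_max_right _ _
    have ha0 : (0:Int) ≤ max 0 (-d) := le_max_left _ _
    have hem := min_le_left (b.length : Int) ((n : Int) - d)
    have hen := min_le_right (b.length : Int) ((n : Int) - d)
    rw [Bool.or_eq_true] at hor
    rcases hor with hcl | hcl
    · left
      rcases (pvCheckLine_iff _).mp hcl with ⟨j, hlen, hxo, h1, h2, h3⟩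
      rw [pv_line_length] at hlen
      rw [hget1 d j (by omega)] at hxo h1 h2 h3
      rw [hget1 d (j+1) (by omega)] at h1
      rw [hget1 d (j+2) (by omega)] at h2
      rw [hget1 d (j+3) (by omega)] at h3
      refine ⟨(max 0 (-d) + (j:Int)).toNat, (max 0 (-d) + (j:Int) + d).toNat,
        by omega, by omega, hxo, ?_, ?_, ?_⟩
      · exact (pvCellN_congr b (by omega) (by omega)).trans h1
      · exact (pvCellN_congr b (by omega) (by omega)).trans h2
      · exact (pvCellN_congr b (by omega) (by omega)).trans h3
    · right
      rcases (pvCheckLine_iff _).mp hcl with ⟨j, hlen, hxo, h1, h2, h3⟩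
      rw [pv_line_length] at hlen
      rw [hget2 d j (by omega)] at hxo h1 h2 h3
      rw [hget2 d (j+1) (by omega)] at h1
      rw [hget2 d (j+2) (by omega)] at h2
      rw [hget2 d (j+3) (by omega)] at h3
      refine ⟨(max 0 (-d) + (j:Int)).toNat, ((n : Int) - 1 - (max 0 (-d) + (j:Int)) - d).toNat,
        by omega, by omega, by omega, hxo, ?_, ?_, ?_⟩
      · exact (pvCellN_congr b (by omega) (by omega)).trans h1
      · exact (pvCellN_congr b (by omega) (by omega)).trans h2
      · exact (pvCellN_congr b (by omega) (by omega)).trans h3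
  · rintro (⟨r, c, hrm, hcn, hxo, h1, h2, h3⟩ | ⟨r, c, hrm, hc3, hcn, hxo, h1, h2, h3⟩)
    · refine ⟨(c : Int) - (r : Int), by rw [PySem.List.mem_pyRange_one]; omega, ?_⟩
      rw [Bool.or_eq_true]; left
      rw [pvCheckLine_iff]
      set d := (c : Int) - (r : Int) with hd
      have had : -d ≤ max 0 (-d) := le_max_right _ _
      have ha0 : (0:Int) ≤ max 0 (-d) := le_max_left _ _
      have har : max 0 (-d) ≤ (r : Int) := max_le (by omega) (by omega)
      have hemin : ((r : Int) + 3) < min (b.length : Int) ((n : Int) - d) :=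
        lt_min (by omega) (by omega)
      refine ⟨r - (max 0 (-d)).toNat, ?_, ?_, ?_, ?_, ?_⟩
      · rw [pv_line_length]; omega
      · rw [hget1 d _ (by omega)]
        convert hxo using 3 <;> omega
      · rw [hget1 d _ (by omega), hget1 d _ (by omega)]
        convert h1 using 2 <;> omega
      · rw [hget1 d _ (by omega), hget1 d _ (by omega)]
        convert h2 using 2 <;> omega
      · rw [hget1 d _ (by omega), hget1 d _ (by omega)]
        convert h3 using 2 <;> omega
    · refine ⟨(n : Int) - 1 - (r : Int) - (c : Int), by rw [PySem.List.mem_pyRange_one]; omega, ?_⟩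
      rw [Bool.or_eq_true]; right
      rw [pvCheckLine_iff]
      set d := (n : Int) - 1 - (r : Int) - (c : Int) with hd
      have had : -d ≤ max 0 (-d) := le_max_right _ _
      have ha0 : (0:Int) ≤ max 0 (-d) := le_max_left _ _
      have har : max 0 (-d) ≤ (r : Int) := max_le (by omega) (by omega)
      have hemin : ((r : Int) + 3) < min (b.length : Int) ((n : Int) - d) :=
        lt_min (by omega) (by omega)
      refine ⟨r - (max 0 (-d)).toNat, ?_, ?_, ?_, ?_, ?_⟩
      · rw [pv_line_length]; omega
      · rw [hget2 d _ (by omega)]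
        convert hxo using 3 <;> omega
      · rw [hget2 d _ (by omega), hget2 d _ (by omega)]
        convert h1 using 2 <;> omega
      · rw [hget2 d _ (by omega), hget2 d _ (by omega)]
        convert h2 using 2 <;> omega
      · rw [hget2 d _ (by omega), hget2 d _ (by omega)]
        convert h3 using 2 <;> omega


theorem pvXO_iff (s : String) : pvXO s = true ↔ (s = "X" ∨ s = "O") := by
  simp [pvXO]

theorem pv_B_iff (b : List (List String)) (n : Nat) :
    ((List.range b.length).any (fun r => (List.range n).any (fun c =>
        let v := pvCell b r c
        (v == "X" || v == "O") &&
        pvDirs.any (fun dir =>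
          decide (0 ≤ (r : Int) + 3 * dir.1) && decide ((r : Int) + 3 * dir.1 < (b.length : Int)) &&
          decide (0 ≤ (c : Int) + 3 * dir.2) && decide ((c : Int) + 3 * dir.2 < (n : Int)) &&
          ([(1 : Int), 2, 3]).all (fun k =>
            pvCell b ((r : Int) + k * dir.1) ((c : Int) + k * dir.2) == v)))) = true)
    ↔ (pvWinR b b.length n ∨ pvWinC b b.length n ∨ pvWinD1 b b.length n ∨ pvWinD2 b b.length n) := by
  have hrc : ∀ (r c : Nat), pvCell b r c = pvCellN b r c := by
    intro r c
    rw [pvCell_toNat b (by omega) (by omega)]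
    exact pvCellN_congr b (by omega) (by omega)
  simp only [List.any_eq_true, List.mem_range, pvDirs, List.any_cons, List.any_nil,
    List.all_cons, List.all_nil, Bool.and_eq_true, Bool.or_eq_true, decide_eq_true_eq,
    beq_iff_eq, and_true, one_mul, mul_zero, mul_one, add_zero, Bool.false_eq_true, or_false]
  constructor
  · rintro ⟨r, hr, c, hc, hv, hdisj⟩
    rw [hrc] at hv
    rcases hdisj with ⟨⟨⟨⟨hb1, hb2⟩, hb3⟩, hb4⟩, h1, h2, h3⟩ |
      ⟨⟨⟨⟨hb1, hb2⟩, hb3⟩, hb4⟩, h1, h2, h3⟩ |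
      ⟨⟨⟨⟨hb1, hb2⟩, hb3⟩, hb4⟩, h1, h2, h3⟩ |
      ⟨⟨⟨⟨hb1, hb2⟩, hb3⟩, hb4⟩, h1, h2, h3⟩
    · refine Or.inl ⟨r, c, by omega, by omega, (pvXO_iff _).mpr hv, ?_, ?_, ?_⟩
      · rw [pvCell_toNat b (by omega) (by omega), hrc] at h1; convert h1 using 2 <;> omega
      · rw [pvCell_toNat b (by omega) (by omega), hrc] at h2; convert h2 using 2 <;> omega
      · rw [pvCell_toNat b (by omega) (by omega), hrc] at h3; convert h3 using 2 <;> omega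
    · refine Or.inr (Or.inl ⟨r, c, by omega, by omega, (pvXO_iff _).mpr hv, ?_, ?_, ?_⟩)
      · rw [pvCell_toNat b (by omega) (by omega), hrc] at h1; convert h1 using 2 <;> omega
      · rw [pvCell_toNat b (by omega) (by omega), hrc] at h2; convert h2 using 2 <;> omega
      · rw [pvCell_toNat b (by omega) (by omega), hrc] at h3; convert h3 using 2 <;> omega
    · refine Or.inr (Or.inr (Or.inl ⟨r, c, by omega, by omega, (pvXO_iff _).mpr hv, ?_, ?_, ?_⟩))
      · rw [pvCell_toNat b (by omega) (by omega), hrc] at h1; convert h1 using 2 <;> omega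
      · rw [pvCell_toNat b (by omega) (by omega), hrc] at h2; convert h2 using 2 <;> omega
      · rw [pvCell_toNat b (by omega) (by omega), hrc] at h3; convert h3 using 2 <;> omega
    · refine Or.inr (Or.inr (Or.inr ⟨r, c, by omega, by omega, by omega, (pvXO_iff _).mpr hv, ?_, ?_, ?_⟩))
      · rw [pvCell_toNat b (by omega) (by omega), hrc] at h1; convert h1 using 2 <;> omega
      · rw [pvCell_toNat b (by omega) (by omega), hrc] at h2; convert h2 using 2 <;> omega
      · rw [pvCell_toNat b (by omega) (by omega), hrc] at h3; convert h3 using 2 <;> omega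
  · have cellgoal : ∀ (r c r' c' : Nat), pvCellN b r' c' = pvCellN b r c →
        ∀ (i jj : Int), 0 ≤ i → 0 ≤ jj → i.toNat = r' → jj.toNat = c' →
        pvCell b i jj = pvCell b (r : Int) (c : Int) := by
      intro r c r' c' h i jj hi hj hir hjc
      rw [pvCell_toNat b hi hj, hrc r c, hir, hjc]
      exact h
    rintro (⟨r, c, hrm, hcn, hxo, h1, h2, h3⟩ | ⟨r, c, hrm, hcn, hxo, h1, h2, h3⟩ |
      ⟨r, c, hrm, hcn, hxo, h1, h2, h3⟩ | ⟨r, c, hrm, hc3, hcn, hxo, h1, h2, h3⟩)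
    · refine ⟨r, by omega, c, by omega, by rw [hrc]; exact (pvXO_iff _).mp hxo, Or.inl
        ⟨⟨⟨⟨by omega, by omega⟩, by omega⟩, by omega⟩,
         cellgoal r c _ _ h1 _ _ (by omega) (by omega) (by omega) (by omega),
         cellgoal r c _ _ h2 _ _ (by omega) (by omega) (by omega) (by omega),
         cellgoal r c _ _ h3 _ _ (by omega) (by omega) (by omega) (by omega)⟩⟩
    · refine ⟨r, by omega, c, by omega, by rw [hrc]; exact (pvXO_iff _).mp hxo, Or.inr (Or.inl
        ⟨⟨⟨⟨by omega, by omega⟩, by omega⟩, by omega⟩,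
         cellgoal r c _ _ h1 _ _ (by omega) (by omega) (by omega) (by omega),
         cellgoal r c _ _ h2 _ _ (by omega) (by omega) (by omega) (by omega),
         cellgoal r c _ _ h3 _ _ (by omega) (by omega) (by omega) (by omega)⟩)⟩
    · refine ⟨r, by omega, c, by omega, by rw [hrc]; exact (pvXO_iff _).mp hxo, Or.inr (Or.inr (Or.inl
        ⟨⟨⟨⟨by omega, by omega⟩, by omega⟩, by omega⟩,
         cellgoal r c _ _ h1 _ _ (by omega) (by omega) (by omega) (by omega),
         cellgoal r c _ _ h2 _ _ (by omega) (by omega) (by omega) (by omega),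
         cellgoal r c _ _ h3 _ _ (by omega) (by omega) (by omega) (by omega)⟩))⟩
    · refine ⟨r, by omega, c, by omega, by rw [hrc]; exact (pvXO_iff _).mp hxo, Or.inr (Or.inr (Or.inr
        ⟨⟨⟨⟨by omega, by omega⟩, by omega⟩, by omega⟩,
         cellgoal r c _ _ h1 _ _ (by omega) (by omega) (by omega) (by omega),
         cellgoal r c _ _ h2 _ _ (by omega) (by omega) (by omega) (by omega),
         cellgoal r c _ _ h3 _ _ (by omega) (by omega) (by omega) (by omega)⟩))⟩


theorem pv_count_filter (l : List String) :
    l.count "X" + l.count "O" = (l.filter (fun cell => cell == "X" || cell == "O")).length := by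
  induction l with
  | nil => simp
  | cons x t ih =>
    by_cases hx : x = "X" <;> by_cases ho : x = "O" <;> simp_all <;> omega

-- ===== VERDICT (by name: the statement is the Claim_ definition above) =====
theorem compute_game_state_spec : Claim_equal_compute_game_state := by
  intro board _ hpre
  unfold Spec_compute_game_state compute_game_state compute_game_state_alt
  simp only []
  have hcnt := pv_count_filter (board.flatMap (fun row => row))
  by_cases h6 : (board.flatMap (fun row => row)).count "X" + (board.flatMap (fun row => row)).count "O" < 6
  · have h6B : ((board.flatMap (fun row => row)).filter
        (fun cell => cell == "X" || cell == "O")).length < 6 := by rw [← hcnt]; exact h6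
    rw [if_pos h6, if_pos h6B]
  · have h6B : ¬ ((board.flatMap (fun row => row)).filter
        (fun cell => cell == "X" || cell == "O")).length < 6 := fun hlt => h6 (by rw [hcnt]; exact hlt)
    rw [if_neg h6, if_neg h6B]
    have hrect : ∀ row ∈ board, row.length = (board.headD []).length := by
      rcases hpre with h | h
      · exact h
      · exfalso
        rw [List.countP_eq_length_filter] at h
        omega
    have hA := pv_rows_iff board (board.headD []).length hrect
    have hC := pv_cols_iff board (board.headD []).length
    have hD := pv_diags_iff board (board.headD []).length
    have hB := pv_B_iff board (board.headD []).length
    by_cases hw : (pvWinR board board.length (board.headD []).length ∨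
        pvWinC board board.length (board.headD []).length ∨
        pvWinD1 board board.length (board.headD []).length ∨
        pvWinD2 board board.length (board.headD []).length)
    · rw [if_pos (hB.mpr hw)]
      by_cases h1 : (board.any (fun row => pvCheckLine row)) = true
      · rw [if_pos h1]
      · rw [if_neg h1]
        by_cases h2 : ((PySem.List.pyRange 0 ((board.headD []).length : Int) 1).any (fun col =>
            pvCheckLine ((PySem.List.pyRange 0 (board.length : Int) 1).map
              (fun row => pvCell board row col)))) = true
        · rw [if_pos h2]
        · rw [if_neg h2]
          rw [if_pos (hD.mpr ?_)]
          rcases hw with h | h | h | h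
          · exact absurd (hA.mpr h) h1
          · exact absurd (hC.mpr h) h2
          · exact Or.inl h
          · exact Or.inr h
    · rw [if_neg (fun hb => hw (hB.mp hb))]
      rw [if_neg (fun h => hw (Or.inl (hA.mp h)))]
      rw [if_neg (fun h => hw (Or.inr (Or.inl (hC.mp h))))]
      rw [if_neg (fun h => hw ?_)]
      rcases hD.mp h with h' | h'
      · exact Or.inr (Or.inr (Or.inl h'))
      · exact Or.inr (Or.inr (Or.inr h'))
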